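-- pv_equiv track=rewrite | github.com/Abderrahim-Fezouati/graph-corag | src/graphcorag/rules.py | extract_surfaces
-- ===== SOURCE A (Python) =====
-- from typing import Dict, List, Optional, Tuple, Iterable, Set
--
-- def _tok_lc(s: str) -> str:
--     return (s or "").lower()
--
-- def extract_surfaces(surface2cui: Dict[str, str], text: str) -> List[Tuple[str, str]]:
--     q = _tok_lc(text)
--     keys = sorted(surface2cui.keys(), key=len, reverse=True)
--     found: List[Tuple[str, str]] = []
--     used_spans: List[Tuple[int, int]] = []
--     for k in keys:
--         start = 0
--         while True:
--             idx = q.find(k, start)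
--             if idx < 0:
--                 break
--             span = (idx, idx + len(k))
--             if any(not (span[1] <= s or span[0] >= e) for s, e in used_spans):
--                 start = idx + 1
--                 continue
--             found.append((k, surface2cui[k]))
--             used_spans.append(span)
--             start = idx + len(k)
--     found.sort(key=lambda kv: q.find(kv[0]))
--     return found
-- ===== SOURCE B (Python) =====
-- def extract_surfaces(surface2cui, text):
--     # Free-list algorithm: keep the still-uncovered stretches of the text as a
--     # sorted list of gaps; each key is searched only inside those gaps, and a
--     # hit splits its gap, so no overlap checks against accepted spans are needed.
--     q = (text or "").lower()
--     found = []
--     gaps = [(0, len(q))]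
--     for k in sorted(surface2cui, key=len, reverse=True):
--         cui = surface2cui[k]
--         new_gaps = []
--         for a, b in gaps:
--             while True:
--                 i = q.find(k, a, b)
--                 if i < 0:
--                     break
--                 found.append((k, cui))
--                 if a < i:
--                     new_gaps.append((a, i))
--                 a = i + len(k)
--             if a < b:
--                 new_gaps.append((a, b))
--         gaps = new_gaps
--     found.sort(key=lambda kv: q.find(kv[0]))
--     return found
-- ===== Notes on version B (the rewrite author's own statement) =====
-- stated objective: alternative
-- what changed: A rescans the whole text per key with find-restarts and tests every candidate span against the growing list of accepted spans; B instead maintains the complement - a sorted free-gap list of still-uncovered stretches - searches each key only inside those windows and splits a window at every hit, so no overlap checks against accepted spans exist at all.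
import Mathlib
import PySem

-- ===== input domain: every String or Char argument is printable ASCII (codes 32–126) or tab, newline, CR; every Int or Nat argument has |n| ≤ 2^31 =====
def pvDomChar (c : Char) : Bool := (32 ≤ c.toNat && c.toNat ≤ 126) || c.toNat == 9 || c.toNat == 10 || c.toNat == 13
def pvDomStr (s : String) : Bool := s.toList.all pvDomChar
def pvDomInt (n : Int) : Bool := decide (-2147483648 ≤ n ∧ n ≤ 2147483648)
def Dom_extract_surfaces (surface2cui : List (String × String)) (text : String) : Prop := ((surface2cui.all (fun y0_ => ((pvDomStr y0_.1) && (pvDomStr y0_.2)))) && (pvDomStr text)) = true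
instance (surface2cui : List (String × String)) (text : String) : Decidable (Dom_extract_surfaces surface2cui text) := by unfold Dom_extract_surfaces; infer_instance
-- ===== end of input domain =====

-- B keeps the still-uncovered stretches of the text as a sorted free-gap list and searches each
-- key only inside those gaps, splitting a gap at every hit, so A's per-candidate overlap scans
-- over the accepted-span list disappear; same value everywhere on Pre_ (no empty keys);
-- objective: alternative.

-- ===== PORT A =====
-- _tok_lc(s) = (s or "").lower()
def tok_lc (s : String) : String := PySem.Str.lower (if s = "" then "" else s)

-- the inner `while True` loop of A for one key k (entry e = (k, surface2cui[k])).
-- fuel totalizes the Python while-loop; with k ≠ "" (Pre_) the loop runs at most len(q)+1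
-- times, so the fuel len(q)+1 the caller passes is never exhausted.
def aScan (cq k : List Char) (e : String × String) :
    Nat → Int → List (String × String) → List (Int × Int) →
    List (String × String) × List (Int × Int)
  | 0, _, found, spans => (found, spans)
  | f+1, start, found, spans =>
    let idx := PySem.Chars.findFrom cq k start none
    if idx < 0 then (found, spans)
    else if spans.any (fun se => !(decide (idx + (k.length : Int) ≤ se.1) || decide (se.2 ≤ idx))) then
      aScan cq k e f (idx + 1) found spans
    else
      aScan cq k e f (idx + (k.length : Int)) (found ++ [e]) (spans ++ [(idx, idx + (k.length : Int))])

def extract_surfaces (surface2cui : List (String × String)) (text : String) : List (String × String) :=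
  let q := tok_lc text
  let d := PySem.Dict.ofList surface2cui
  let keys := PySem.List.sorted d.keys (fun s => PySem.Str.len s) true
  -- surface2cui[k] with k a key of d: exact as d.getD k ""
  let res := keys.foldl
    (fun st k => aScan q.toList k.toList (k, d.getD k "") (q.toList.length + 1) 0 st.1 st.2)
    (([] : List (String × String)), ([] : List (Int × Int)))
  PySem.List.sorted res.1 (fun kv => PySem.Str.find q kv.1) false

-- ===== PORT B =====
-- B's per-gap `while True` loop (plus the trailing `if a < b: new_gaps.append((a, b))`):
-- search k in the free window with q.find(k, a, b); a hit at i records the left remainder (a, i)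
-- as a gap and continues in (i + len(k), b).  fuel totalizes the loop: each round moves a
-- forward by at least 1 (k ≠ "" by Pre_), so the fuel len(q)+1 the caller passes suffices.
def bGap (cq k : List Char) (e : String × String) :
    Nat → Int → Int → List (String × String) → List (Int × Int) →
    List (String × String) × List (Int × Int)
  | 0, _, _, found, gaps => (found, gaps)
  | f+1, a, b, found, gaps =>
    let i := PySem.Chars.findFrom cq k a (some b)
    if i < 0 then
      (found, if a < b then gaps ++ [(a, b)] else gaps)
    else
      bGap cq k e f (i + (k.length : Int)) b (found ++ [e])
        (if a < i then gaps ++ [(a, i)] else gaps)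

def extract_surfaces_alt (surface2cui : List (String × String)) (text : String) : List (String × String) :=
  let q := PySem.Str.lower (if text = "" then "" else text)
  let d := PySem.Dict.ofList surface2cui
  let keys := PySem.List.sorted d.keys (fun s => PySem.Str.len s) true
  -- per key: fold B's gap loop over the current free-gap list, rebuilding it in new_gaps
  let res := keys.foldl
    (fun st k => st.2.foldl
        (fun st2 g => bGap q.toList k.toList (k, d.getD k "") (q.toList.length + 1) g.1 g.2 st2.1 st2.2)
        (st.1, ([] : List (Int × Int))))
    (([] : List (String × String)), [((0 : Int), (q.toList.length : Int))])
  PySem.List.sorted res.1 (fun kv => PySem.Str.find q kv.1) false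

-- ===== PRECONDITION & SPEC =====
-- Pre_ excludes dicts containing the empty-string key "", on which A's inner while-loop
-- (start = idx + len(k) makes no progress) never terminates.
def Pre_extract_surfaces (surface2cui : List (String × String)) (text : String) : Prop :=
  ∀ p ∈ surface2cui, p.1 ≠ ""
instance (surface2cui : List (String × String)) (text : String) : Decidable (Pre_extract_surfaces surface2cui text) := by unfold Pre_extract_surfaces; infer_instance

def pvWitness_extract_surfaces : (List (String × String)) × String :=
  ([("ab", "C1"), ("b", "C2")], "xAb yb")

def Spec_extract_surfaces (surface2cui : List (String × String)) (text : String) (out : List (String × String)) : Prop := out = extract_surfaces_alt surface2cui text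
instance (surface2cui : List (String × String)) (text : String) (out : List (String × String)) : Decidable (Spec_extract_surfaces surface2cui text out) := by unfold Spec_extract_surfaces; infer_instance

-- ===== CLAIM (what is proved, stated in full; the proofs are below) =====
def Claim_equal_extract_surfaces : Prop := ∀ (surface2cui : List (String × String)) (text : String), Dom_extract_surfaces surface2cui text → Pre_extract_surfaces surface2cui text → Spec_extract_surfaces surface2cui text (extract_surfaces surface2cui text)

-- ===== LEMMAS AND PROOFS =====

-- `Within l j`: j lies in one of the half-open intervals of l (used both for A's accepted
-- spans — "j is covered" — and for B's free gaps — "j is free").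
def Within (l : List (Int × Int)) (j : Int) : Prop := ∃ p ∈ l, p.1 ≤ j ∧ j < p.2

-- sorted chain of intervals: starts ≥ lo, nonempty-or-degenerate (fst ≤ snd), strictly
-- separated, ends < hi
def GapsOK : Int → Int → List (Int × Int) → Prop
  | lo, hi, [] => lo ≤ hi
  | lo, hi, g :: rest => lo ≤ g.1 ∧ g.1 ≤ g.2 ∧ GapsOK (g.2 + 1) hi rest

theorem Within_append (P Q : List (Int × Int)) (j : Int) :
    Within (P ++ Q) j ↔ Within P j ∨ Within Q j := by
  constructor
  · rintro ⟨p, hp, h⟩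
    rcases List.mem_append.mp hp with hp | hp
    · exact Or.inl ⟨p, hp, h⟩
    · exact Or.inr ⟨p, hp, h⟩
  · rintro (⟨p, hp, h⟩ | ⟨p, hp, h⟩)
    · exact ⟨p, List.mem_append.mpr (Or.inl hp), h⟩
    · exact ⟨p, List.mem_append.mpr (Or.inr hp), h⟩

theorem Within_singleton (a b j : Int) : Within [(a, b)] j ↔ a ≤ j ∧ j < b := by
  simp [Within]

theorem GapsOK_le : ∀ (lo hi : Int) (l : List (Int × Int)), GapsOK lo hi l → lo ≤ hi := by
  intro lo hi l
  induction l generalizing lo with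
  | nil => exact fun h => h
  | cons g rest ih =>
    rintro ⟨h1, h2, h3⟩
    have := ih _ h3
    omega

theorem GapsOK_weaken : ∀ (lo lo' hi : Int) (l : List (Int × Int)), lo' ≤ lo →
    GapsOK lo hi l → GapsOK lo' hi l := by
  intro lo lo' hi l h hl
  cases l with
  | nil => exact le_trans h hl
  | cons g rest => exact ⟨le_trans h hl.1, hl.2.1, hl.2.2⟩

theorem GapsOK_mono_hi : ∀ (lo hi hi' : Int) (l : List (Int × Int)), hi ≤ hi' →
    GapsOK lo hi l → GapsOK lo hi' l := by
  intro lo hi hi' l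
  induction l generalizing lo with
  | nil => intro h hl; exact le_trans hl h
  | cons g rest ih => intro h hl; exact ⟨hl.1, hl.2.1, ih _ h hl.2.2⟩

theorem GapsOK_append : ∀ (lo m hi : Int) (P Q : List (Int × Int)),
    GapsOK lo m P → GapsOK m hi Q → GapsOK lo hi (P ++ Q) := by
  intro lo m hi P Q hP hQ
  induction P generalizing lo with
  | nil => exact GapsOK_weaken _ _ _ _ hP hQ
  | cons g rest ih => exact ⟨hP.1, hP.2.1, ih _ hP.2.2⟩

theorem Within_bounds : ∀ (lo hi : Int) (l : List (Int × Int)) (j : Int),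
    GapsOK lo hi l → Within l j → lo ≤ j ∧ j + 1 < hi := by
  intro lo hi l j hl hj
  induction l generalizing lo with
  | nil => rcases hj with ⟨p, hp, _⟩; cases hp
  | cons g rest ih =>
    rcases hj with ⟨p, hp, h1, h2⟩
    rcases List.mem_cons.mp hp with rfl | hp
    · have := GapsOK_le _ _ _ hl.2.2
      have := hl.1
      have := hl.2.1
      omega
    · have := ih _ hl.2.2 ⟨p, hp, h1, h2⟩
      have := hl.1
      have := hl.2.1
      omega

-- the overlap test A runs per candidate, read as "some position in [x, y) is covered"
theorem overlap_any_iff (S : List (Int × Int)) (x y : Int)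
    (hWF : ∀ se ∈ S, se.1 < se.2) (hxy : x < y) :
    (S.any (fun se => !(decide (y ≤ se.1) || decide (se.2 ≤ x)))) = true ↔
    ∃ p, x ≤ p ∧ p < y ∧ Within S p := by
  simp only [List.any_eq_true, Bool.not_eq_true', Bool.or_eq_false_iff, decide_eq_false_iff_not,
    not_le]
  constructor
  · rintro ⟨se, hse, h1, h2⟩
    have := hWF se hse
    exact ⟨max x se.1, le_max_left _ _, by omega, se, hse, by omega, by omega⟩
  · rintro ⟨p, hxp, hpy, se, hse, h1, h2⟩
    exact ⟨se, hse, by omega, by omega⟩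

theorem Within_push (S : List (Int × Int)) (x y j : Int) :
    Within (S ++ [(x, y)]) j ↔ Within S j ∨ (x ≤ j ∧ j < y) := by
  rw [Within_append, Within_singleton]

-- ===== facts about A's scan =====

theorem aScan_fuel (cq k : List Char) (e : String × String) (hk : k ≠ []) :
    ∀ (f f' s : Nat) (found : List (String × String)) (S : List (Int × Int)),
      s ≤ cq.length → cq.length + 1 - s ≤ f → cq.length + 1 - s ≤ f' →
      aScan cq k e f (s : Int) found S = aScan cq k e f' (s : Int) found S := by
  intro f
  induction f with
  | zero => intro f' s found S hs hf hf'; omega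
  | succ f0 ih =>
    intro f' s found S hs hf hf'
    obtain ⟨f1, rfl⟩ : ∃ f1, f' = f1 + 1 := ⟨f' - 1, by omega⟩
    by_cases hneg : PySem.Chars.findFrom cq k ((s : Nat) : Int) none < 0
    · simp only [aScan, if_pos hneg]
    · have hne : PySem.Chars.findFrom cq k ((s : Nat) : Int) none ≠ -1 := by
        intro h; rw [h] at hneg; exact hneg (by norm_num)
      have spec := PySem.Chars.findFrom_natCast_spec cq k s hs hne
      set r := PySem.Chars.findFrom cq k ((s : Nat) : Int) none with hr
      have hr0 : (0 : Int) ≤ r := not_lt.mp hneg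
      have hocc := spec.2.1
      have hL : 0 < k.length := List.length_pos_iff.mpr hk
      have hsr : s ≤ r.toNat := by have h1 := spec.1; omega
      have hrL : r.toNat + k.length ≤ cq.length := by
        have h1 := hocc.length_le; rw [List.length_drop] at h1
        omega
      simp only [aScan]
      rw [← hr, if_neg hneg, if_neg hneg]
      by_cases hov : (S.any (fun se => !(decide (r + (k.length : Int) ≤ se.1) || decide (se.2 ≤ r)))) = true
      · rw [if_pos hov, if_pos hov]
        rw [show r + 1 = (((r.toNat + 1 : Nat)) : Int) from by omega]
        exact ih f1 (r.toNat + 1) found S (by omega) (by omega) (by omega)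
      · rw [if_neg hov, if_neg hov]
        rw [show r + (k.length : Int) = (((r.toNat + k.length : Nat)) : Int) from by omega]
        exact ih f1 (r.toNat + k.length) _ _ (by omega) (by omega) (by omega)

theorem aScan_drain (cq k : List Char) (e : String × String) (hk : k ≠ []) :
    ∀ (f s : Nat) (found : List (String × String)) (S : List (Int × Int)),
      s ≤ cq.length → cq.length + 1 - s ≤ f →
      (∀ j : Nat, s ≤ j → k <+: cq.drop j →
        (S.any (fun se => !(decide ((j : Int) + (k.length : Int) ≤ se.1) || decide (se.2 ≤ (j : Int))))) = true) →
      aScan cq k e f (s : Int) found S = (found, S) := by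
  intro f
  induction f with
  | zero => intro s found S hs hf _; omega
  | succ f0 ih =>
    intro s found S hs hf hcov
    by_cases hneg : PySem.Chars.findFrom cq k ((s : Nat) : Int) none < 0
    · simp only [aScan, if_pos hneg]
    · have hne : PySem.Chars.findFrom cq k ((s : Nat) : Int) none ≠ -1 := by
        intro h; rw [h] at hneg; exact hneg (by norm_num)
      have spec := PySem.Chars.findFrom_natCast_spec cq k s hs hne
      set r := PySem.Chars.findFrom cq k ((s : Nat) : Int) none with hr
      have hr0 : (0 : Int) ≤ r := not_lt.mp hneg
      have hcast : r = ((r.toNat : Nat) : Int) := (Int.toNat_of_nonneg hr0).symm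
      have hocc : k <+: cq.drop r.toNat := spec.2.1
      have hsr : s ≤ r.toNat := by have h1 := spec.1; omega
      have hov := hcov r.toNat hsr hocc
      rw [← hcast] at hov
      have hL : 0 < k.length := List.length_pos_iff.mpr hk
      have hrL : r.toNat + k.length ≤ cq.length := by
        have h1 := hocc.length_le; rw [List.length_drop] at h1
        omega
      simp only [aScan]
      rw [← hr, if_neg hneg, if_pos hov]
      rw [show r + 1 = (((r.toNat + 1 : Nat)) : Int) from by omega]
      exact ih (r.toNat + 1) found S (by omega) (by omega)
        (fun j hj hocj => hcov j (by omega) hocj)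

theorem aScan_skip (cq k : List Char) (e : String × String) (hk : k ≠ []) :
    ∀ (f s t : Nat) (found : List (String × String)) (S : List (Int × Int)),
      s ≤ t → t ≤ cq.length → cq.length + 1 - s ≤ f →
      (∀ j : Nat, s ≤ j → j < t → k <+: cq.drop j →
        (S.any (fun se => !(decide ((j : Int) + (k.length : Int) ≤ se.1) || decide (se.2 ≤ (j : Int))))) = true) →
      aScan cq k e f (s : Int) found S = aScan cq k e f (t : Int) found S := by
  intro f
  induction f with
  | zero => intro s t found S hst ht hf _; omega
  | succ f0 ih =>
    intro s t found S hst ht hf hcov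
    by_cases hne : PySem.Chars.findFrom cq k ((s : Nat) : Int) none = -1
    · -- no occurrence at or after s: both sides stop at once
      have hs_none : ¬ k <:+: cq.drop s :=
        (PySem.Chars.findFrom_natCast_eq_neg_one_iff cq k s (le_trans hst ht)).mp hne
      have ht_none : PySem.Chars.findFrom cq k ((t : Nat) : Int) none = -1 := by
        rw [PySem.Chars.findFrom_natCast_eq_neg_one_iff cq k t ht]
        intro hinf
        exact hs_none (by
          have hd : cq.drop t = (cq.drop s).drop (t - s) := by
            rw [List.drop_drop]; congr 1; omega
          rw [hd] at hinf
          exact hinf.trans (List.drop_suffix _ _).isInfix)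
      simp only [aScan, hne, ht_none]
    · have spec := PySem.Chars.findFrom_natCast_spec cq k s (le_trans hst ht) hne
      set r := PySem.Chars.findFrom cq k ((s : Nat) : Int) none with hr
      have hr0 : (0 : Int) ≤ r := le_trans (Int.natCast_nonneg s) spec.1
      have hneg : ¬ r < 0 := by omega
      have hcast : r = ((r.toNat : Nat) : Int) := (Int.toNat_of_nonneg hr0).symm
      have hocc : k <+: cq.drop r.toNat := spec.2.1
      have hsr : s ≤ r.toNat := by have h1 := spec.1; omega
      have hrL : r.toNat + k.length ≤ cq.length := by
        have h1 := hocc.length_le; rw [List.length_drop] at h1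
        have : 0 < k.length := List.length_pos_iff.mpr hk
        omega
      by_cases hlt : r.toNat < t
      · -- the occurrence is before t: A rejects it and advances one step
        have hov := hcov r.toNat hsr hlt hocc
        rw [← hcast] at hov
        simp only [aScan]
        rw [← hr, if_neg hneg, if_pos hov]
        rw [show r + 1 = (((r.toNat + 1 : Nat)) : Int) from by omega]
        rw [ih (r.toNat + 1) t found S (by omega) ht (by omega)
          (fun j hj hjt hocj => hcov j (by omega) hjt hocj)]
        exact aScan_fuel cq k e hk f0 (f0 + 1) t found S ht (by omega) (by omega)
      · -- the occurrence is at or past t: the find from t returns the same index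
        have hne_t : PySem.Chars.findFrom cq k ((t : Nat) : Int) none ≠ -1 := by
          intro h
          refine (PySem.Chars.findFrom_natCast_eq_neg_one_iff cq k t ht).mp h ?_
          have hd : cq.drop r.toNat = (cq.drop t).drop (r.toNat - t) := by
            rw [List.drop_drop]; congr 1; omega
          rw [hd] at hocc
          exact hocc.isInfix.trans (List.drop_suffix _ _).isInfix
        have spec_t := PySem.Chars.findFrom_natCast_spec cq k t ht hne_t
        set rt := PySem.Chars.findFrom cq k ((t : Nat) : Int) none with hrt
        have hrt0 : (0 : Int) ≤ rt := by
          have := spec_t.1; omega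
        have h1 : rt.toNat ≤ r.toNat := by
          by_contra hgt
          exact spec_t.2.2 r.toNat (by omega) (by omega) hocc
        have h2 : r.toNat ≤ rt.toNat := by
          by_contra hgt
          exact spec.2.2 rt.toNat (by omega) (by omega) spec_t.2.1
        have heq : rt = r := by omega
        simp only [aScan]
        rw [← hr, ← hrt, heq]

theorem prefix_slice_iff (cq k : List Char) (hk : k ≠ []) (aN m t : Nat) :
    k <+: ((cq.drop aN).take m).drop t ↔ k <+: cq.drop (aN + t) ∧ t + k.length ≤ m := by
  have hL : 0 < k.length := List.length_pos_iff.mpr hk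
  have hd : ((cq.drop aN).take m).drop t = (cq.drop (aN + t)).take (m - t) := by
    rw [List.drop_take, List.drop_drop, Nat.add_comm]
  rw [hd, List.prefix_take_iff]
  constructor
  · rintro ⟨h1, h2⟩; exact ⟨h1, by omega⟩
  · rintro ⟨h1, h2⟩; exact ⟨h1, by omega⟩

-- q.find(k, a, b) with natural in-range bounds, reduced to a find on the window
theorem findFrom_some_natCast (cq k : List Char) (aN bN : Nat) (h1 : aN ≤ bN) (h2 : bN ≤ cq.length) :
    PySem.Chars.findFrom cq k (aN : Int) (some (bN : Int)) =
      (if PySem.Chars.find ((cq.drop aN).take (bN - aN)) k = -1 then -1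
       else (aN : Int) + PySem.Chars.find ((cq.drop aN).take (bN - aN)) k) := by
  unfold PySem.Chars.findFrom
  dsimp only
  rw [if_neg (show ¬ ((cq.length : Int)) < ((bN : Int)) from by exact_mod_cast not_lt.mpr h2)]
  rw [if_neg (show ¬ ((bN : Int)) < 0 from by omega)]
  rw [if_neg (show ¬ ((aN : Int)) < 0 from by omega)]
  rw [if_neg (show ¬ ((bN : Int)) < ((aN : Int)) from by exact_mod_cast not_lt.mpr h1)]
  rw [Int.toNat_natCast, Int.toNat_natCast,
    show List.drop aN (List.take bN cq) = (cq.drop aN).take (bN - aN) from List.drop_take]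

-- ===== the window lemma: one run of B's gap loop vs A's scan across that window =====

theorem window (cq k : List Char) (e : String × String) (hk : k ≠ []) :
    ∀ (fB : Nat) (a b : Int) (found : List (String × String)) (S gacc : List (Int × Int)),
      0 ≤ a → a ≤ b → b ≤ (cq.length : Int) →
      (b - a).toNat + 1 ≤ fB →
      (∀ se ∈ S, se.1 < se.2) →
      (∀ j : Int, a ≤ j → j < b → ¬ Within S j) →
      (b = (cq.length : Int) ∨ Within S b) →
      ∃ found' pieces S',
        bGap cq k e fB a b found gacc = (found', gacc ++ pieces) ∧
        GapsOK a (b + 1) pieces ∧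
        (∀ se ∈ S', se.1 < se.2) ∧
        (∀ j : Int, a ≤ j → j < b → (¬ Within S' j ↔ Within pieces j)) ∧
        (∀ j : Int, ¬ (a ≤ j ∧ j < b) → (Within S' j ↔ Within S j)) ∧
        (∀ fA : Nat, cq.length + 1 - a.toNat ≤ fA →
          aScan cq k e fA a found S = aScan cq k e fA b found' S') := by
  intro fB
  induction fB with
  | zero => intro a b found S gacc h0a hab hbn hfuel _ _ _; omega
  | succ f ih =>
    intro a b found S gacc h0a hab hbn hfuel hWF hunc hb
    have hL : 0 < k.length := List.length_pos_iff.mpr hk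
    obtain ⟨aN, rfl⟩ : ∃ aN : Nat, a = (aN : Int) := ⟨a.toNat, (Int.toNat_of_nonneg h0a).symm⟩
    obtain ⟨bN, rfl⟩ : ∃ bN : Nat, b = (bN : Int) := ⟨b.toNat, (Int.toNat_of_nonneg (le_trans h0a hab)).symm⟩
    have habN : aN ≤ bN := by exact_mod_cast hab
    have hbnN : bN ≤ cq.length := by exact_mod_cast hbn
    have hFFeq := findFrom_some_natCast cq k aN bN habN hbnN
    -- an occurrence at jN that sticks out past the window end overlaps the spans
    have hstraddle : ∀ jN : Nat, aN ≤ jN → jN < bN → k <+: cq.drop jN → bN < jN + k.length →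
        (S.any (fun se => !(decide ((jN : Int) + (k.length : Int) ≤ se.1) || decide (se.2 ≤ (jN : Int))))) = true := by
      intro jN h1 h2 hocc h3
      have hjL : jN + k.length ≤ cq.length := by
        have h4 := hocc.length_le; rw [List.length_drop] at h4; omega
      rcases hb with hbn' | hcovb
      · exfalso
        have : bN = cq.length := by exact_mod_cast hbn'
        omega
      · rw [overlap_any_iff S _ _ hWF (by push_cast; omega)]
        exact ⟨(bN : Int), by push_cast; omega, by push_cast; omega, hcovb⟩
    by_cases hjneg : PySem.Chars.find ((cq.drop aN).take (bN - aN)) k < 0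
    · -- no fit inside the window: B closes the window, A skips across it
      have hfneg : PySem.Chars.find ((cq.drop aN).take (bN - aN)) k = -1 := by
        have h1 := PySem.Chars.neg_one_le_find ((cq.drop aN).take (bN - aN)) k
        omega
      have hFF : PySem.Chars.findFrom cq k ((aN : Nat) : Int) (some ((bN : Nat) : Int)) = -1 := by
        rw [hFFeq, if_pos hfneg]
      have hnofit : ∀ t : Nat, ¬ k <+: ((cq.drop aN).take (bN - aN)).drop t := by
        intro t hpre
        exact (PySem.Chars.find_eq_neg_one_iff _ _).mp hfneg
          (hpre.isInfix.trans (List.drop_suffix _ _).isInfix)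
      refine ⟨found, if (aN : Int) < (bN : Int) then [((aN : Int), (bN : Int))] else [], S, ?_, ?_, hWF, ?_, ?_, ?_⟩
      · simp only [bGap]
        rw [hFF, if_pos (by norm_num : (-1 : Int) < 0)]
        by_cases hab' : (aN : Int) < (bN : Int)
        · rw [if_pos hab', if_pos hab']
        · rw [if_neg hab', if_neg hab']; simp
      · by_cases hab' : (aN : Int) < (bN : Int)
        · rw [if_pos hab']
          exact ⟨le_refl _, by omega, by show ((bN : Int) + 1) ≤ _; omega⟩
        · rw [if_neg hab']
          show (aN : Int) ≤ (bN : Int) + 1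
          omega
      · intro j h1 h2
        have hab' : (aN : Int) < (bN : Int) := lt_of_le_of_lt h1 h2
        rw [if_pos hab', Within_singleton]
        constructor
        · intro _; exact ⟨h1, h2⟩
        · intro _; exact hunc j h1 h2
      · intro j _; exact Iff.rfl
      · intro fA hfA
        rw [Int.toNat_natCast] at hfA
        exact aScan_skip cq k e hk fA aN bN found S habN hbnN hfA (by
          intro jN h1 h2 hocc
          by_cases hfit : jN + k.length ≤ bN
          · exfalso
            apply hnofit (jN - aN)
            rw [prefix_slice_iff cq k hk aN (bN - aN) (jN - aN)]
            refine ⟨?_, by omega⟩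
            rw [show aN + (jN - aN) = jN from by omega]
            exact hocc
          · exact hstraddle jN h1 h2 hocc (by omega))
    · -- leftmost fit at offset j: both sides accept it and continue after it
      have hj0 : (0 : Int) ≤ PySem.Chars.find ((cq.drop aN).take (bN - aN)) k := by omega
      have hspec := PySem.Chars.find_spec hj0
      set j := PySem.Chars.find ((cq.drop aN).take (bN - aN)) k with hjdef
      set jN := j.toNat with hjNdef
      have hcastj : j = (jN : Int) := (Int.toNat_of_nonneg hj0).symm
      have hpre0 : k <+: ((cq.drop aN).take (bN - aN)).drop jN := hspec.1
      have hmin : ∀ t, t < jN → ¬ k <+: ((cq.drop aN).take (bN - aN)).drop t := fun t ht => hspec.2 t ht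
      rw [prefix_slice_iff cq k hk aN (bN - aN) jN] at hpre0
      obtain ⟨hocc_i, hfit⟩ := hpre0
      set iN := aN + jN with hiNdef
      have hiL : iN + k.length ≤ bN := by omega
      have hiNle : iN ≤ cq.length := by omega
      -- IH on the right remainder of the window
      have hih := ih ((iN + k.length : Nat) : Int) (bN : Int) (found ++ [e])
          (S ++ [((iN : Int), (iN : Int) + (k.length : Int))])
          (if (aN : Int) < (aN : Int) + j then gacc ++ [((aN : Int), (aN : Int) + j)] else gacc)
          (by positivity) (by push_cast; omega) hbn (by omega)
          (by
            intro se hse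
            rcases List.mem_append.mp hse with h | h
            · exact hWF se h
            · rcases List.mem_singleton.mp h with rfl
              show (iN : Int) < (iN : Int) + (k.length : Int)
              push_cast; omega)
          (by
            intro j' h1 h2
            rw [Within_push]
            push_cast at h1
            rintro (hS | hnew)
            · exact hunc j' (by omega) h2 hS
            · omega)
          (by
            rcases hb with h | h
            · exact Or.inl h
            · exact Or.inr (by rw [Within_push]; exact Or.inl h))
      obtain ⟨found'', pieces₂, S'', hEq, hOK₂, hWF'', hchar1, hchar2, hlink₂⟩ := hih
      have hleft : ∀ {j' : Int},
          Within (if (aN : Int) < (aN : Int) + j then [((aN : Int), (aN : Int) + j)] else []) j' →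
          (aN : Int) ≤ j' ∧ j' < (aN : Int) + j := by
        intro j' h
        by_cases hc : (aN : Int) < (aN : Int) + j
        · rw [if_pos hc, Within_singleton] at h; exact h
        · rw [if_neg hc] at h; rcases h with ⟨p, hp, _⟩; cases hp
      refine ⟨found'', (if (aN : Int) < (aN : Int) + j then [((aN : Int), (aN : Int) + j)] else []) ++ pieces₂,
        S'', ?_, ?_, hWF'', ?_, ?_, ?_⟩
      · -- the bGap equation
        have hFF : PySem.Chars.findFrom cq k ((aN : Nat) : Int) (some ((bN : Nat) : Int)) = (aN : Int) + j := by
          rw [hFFeq, if_neg (by omega)]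
        simp only [bGap]
        rw [hFF, if_neg (show ¬ (aN : Int) + j < 0 from by omega)]
        rw [show (aN : Int) + j + (k.length : Int) = ((iN + k.length : Nat) : Int) from by
          rw [hcastj]; push_cast; omega]
        rw [hEq]
        by_cases hc : (aN : Int) < (aN : Int) + j
        · rw [if_pos hc, if_pos hc, List.append_assoc]
        · rw [if_neg hc, if_neg hc, List.nil_append]
      · -- the gap chain of the produced pieces
        by_cases hc : (aN : Int) < (aN : Int) + j
        · rw [if_pos hc]
          show (aN : Int) ≤ (aN : Int) ∧ (aN : Int) ≤ (aN : Int) + j ∧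
            GapsOK ((aN : Int) + j + 1) ((bN : Int) + 1) pieces₂
          refine ⟨le_refl _, by omega, GapsOK_weaken _ _ _ _ (by rw [hcastj]; push_cast; omega) hOK₂⟩
        · rw [if_neg hc, List.nil_append]
          exact GapsOK_weaken _ _ _ _ (by rw [hcastj] at hc; push_cast at hc ⊢; omega) hOK₂
      · -- characterization inside the window
        intro j' h1 h2
        rw [Within_append]
        by_cases hz1 : j' < (aN : Int) + j
        · have hposj : (aN : Int) < (aN : Int) + j := by omega
          have houts : ¬ (((iN + k.length : Nat) : Int) ≤ j' ∧ j' < (bN : Int)) := by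
            rw [hcastj] at hz1; push_cast at hz1 ⊢; omega
          rw [hchar2 j' houts, Within_push]
          have hnc : ¬ Within S j' := hunc j' h1 h2
          have hnotnew : ¬ ((iN : Int) ≤ j' ∧ j' < (iN : Int) + (k.length : Int)) := by
            rw [hcastj] at hz1; push_cast at hz1 ⊢; omega
          constructor
          · intro _
            exact Or.inl (by rw [if_pos hposj, Within_singleton]; exact ⟨h1, hz1⟩)
          · intro _
            rintro (hS | hnew)
            · exact hnc hS
            · exact hnotnew hnew
        · by_cases hz2 : j' < (iN : Int) + (k.length : Int)
          · have houts : ¬ (((iN + k.length : Nat) : Int) ≤ j' ∧ j' < (bN : Int)) := by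
              push_cast; omega
            rw [hchar2 j' houts, Within_push]
            have hnew : (iN : Int) ≤ j' ∧ j' < (iN : Int) + (k.length : Int) := by
              rw [hcastj] at hz1; push_cast at hz1 ⊢; omega
            constructor
            · intro hno; exact absurd (Or.inr hnew) hno
            · rintro (hl | hp)
              · exfalso
                have := hleft hl
                rw [hcastj] at hz1 this; push_cast at hz1 this; omega
              · exfalso
                have := Within_bounds _ _ _ _ hOK₂ hp
                push_cast at this; omega
          · have hin : ((iN + k.length : Nat) : Int) ≤ j' := by push_cast; omega
            rw [hchar1 j' hin h2]
            constructor
            · intro h; exact Or.inr h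
            · rintro (hl | hp)
              · exfalso
                have := hleft hl
                rw [hcastj] at hz1 this; push_cast at hz1 this; omega
              · exact hp
      · -- characterization outside the window
        intro j' hout
        have houts2 : ¬ (((iN + k.length : Nat) : Int) ≤ j' ∧ j' < (bN : Int)) := by
          push_cast; push_cast at hout; omega
        rw [hchar2 j' houts2, Within_push]
        constructor
        · rintro (h | hnew)
          · exact h
          · exfalso; push_cast at hnew hout; omega
        · exact Or.inl
      · -- the A-side scan across the window
        intro fA hfA
        rw [Int.toNat_natCast] at hfA
        have hstep1 : aScan cq k e fA ((aN : Nat) : Int) found S = aScan cq k e fA ((iN : Nat) : Int) found S := by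
          apply aScan_skip cq k e hk fA aN iN found S (by omega) hiNle hfA
          intro p h1 h2 hocc
          by_cases hfitp : p + k.length ≤ bN
          · exfalso
            apply hmin (p - aN) (by omega)
            rw [prefix_slice_iff cq k hk aN (bN - aN) (p - aN)]
            refine ⟨?_, by omega⟩
            rw [show aN + (p - aN) = p from by omega]
            exact hocc
          · exact hstraddle p h1 (by omega) hocc (by omega)
        obtain ⟨fA0, rfl⟩ : ∃ g, fA = g + 1 := ⟨fA - 1, by omega⟩
        have hne_i : PySem.Chars.findFrom cq k ((iN : Nat) : Int) none ≠ -1 := by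
          intro h
          exact (PySem.Chars.findFrom_natCast_eq_neg_one_iff cq k iN hiNle).mp h hocc_i.isInfix
        have spec_i := PySem.Chars.findFrom_natCast_spec cq k iN hiNle hne_i
        have hri : PySem.Chars.findFrom cq k ((iN : Nat) : Int) none = ((iN : Nat) : Int) := by
          set r := PySem.Chars.findFrom cq k ((iN : Nat) : Int) none with hr
          have h1 : (iN : Int) ≤ r := spec_i.1
          have h2 : r.toNat ≤ iN := by
            by_contra hgt
            exact spec_i.2.2 iN (le_refl _) (by omega) hocc_i
          omega
        have hov_false : ¬ ((S.any (fun se =>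
            !(decide (((iN : Nat) : Int) + (k.length : Int) ≤ se.1) || decide (se.2 ≤ ((iN : Nat) : Int))))) = true) := by
          rw [overlap_any_iff S _ _ hWF (by push_cast; omega)]
          rintro ⟨p, hp1, hp2, hpS⟩
          exact hunc p (by push_cast at hp1 ⊢; omega) (by push_cast at hp2 ⊢; omega) hpS
        have hstep2 : aScan cq k e (fA0 + 1) ((iN : Nat) : Int) found S =
            aScan cq k e fA0 ((iN + k.length : Nat) : Int) (found ++ [e])
              (S ++ [(((iN : Nat) : Int), ((iN : Nat) : Int) + (k.length : Int))]) := by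
          simp only [aScan]
          rw [hri]
          rw [if_neg (by omega : ¬ ((iN : Nat) : Int) < 0)]
          rw [if_neg hov_false]
          rw [show ((iN : Nat) : Int) + (k.length : Int) = ((iN + k.length : Nat) : Int) from by
            push_cast; ring]
        calc aScan cq k e (fA0 + 1) ((aN : Nat) : Int) found S
            = aScan cq k e (fA0 + 1) ((iN : Nat) : Int) found S := hstep1
          _ = aScan cq k e fA0 ((iN + k.length : Nat) : Int) (found ++ [e])
                (S ++ [(((iN : Nat) : Int), ((iN : Nat) : Int) + (k.length : Int))]) := hstep2
          _ = aScan cq k e fA0 ((bN : Nat) : Int) found'' S'' := by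
                apply hlink₂ fA0
                rw [Int.toNat_natCast]; omega
          _ = aScan cq k e (fA0 + 1) ((bN : Nat) : Int) found'' S'' :=
                aScan_fuel cq k e hk fA0 (fA0 + 1) bN found'' S'' hbnN (by omega) (by omega)

-- ===== the per-key lemma: fold of B's gap loop over the gap list vs A's full scan =====

theorem perKey (cq k : List Char) (e : String × String) (hk : k ≠ []) :
    ∀ (G : List (Int × Int)) (s ℓ : Int) (found : List (String × String))
      (S gacc : List (Int × Int)),
      0 ≤ s → s ≤ ℓ → s ≤ (cq.length : Int) →
      GapsOK ℓ ((cq.length : Int) + 1) G →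
      GapsOK 0 ℓ gacc →
      (∀ se ∈ S, se.1 < se.2) →
      (∀ j : Int, s ≤ j → j < (cq.length : Int) → (¬ Within S j ↔ Within G j)) →
      (∀ j : Int, Within gacc j → j < s) →
      (∀ j : Int, 0 ≤ j → j < s → (¬ Within S j ↔ Within gacc j)) →
      ∃ S',
        (∀ fA : Nat, cq.length + 1 - s.toNat ≤ fA →
          aScan cq k e fA s found S =
            ((G.foldl (fun st g => bGap cq k e (cq.length + 1) g.1 g.2 st.1 st.2) (found, gacc)).1, S')) ∧
        (∀ se ∈ S', se.1 < se.2) ∧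
        GapsOK 0 ((cq.length : Int) + 1)
          (G.foldl (fun st g => bGap cq k e (cq.length + 1) g.1 g.2 st.1 st.2) (found, gacc)).2 ∧
        (∀ j : Int, 0 ≤ j → j < (cq.length : Int) →
          (¬ Within S' j ↔
            Within (G.foldl (fun st g => bGap cq k e (cq.length + 1) g.1 g.2 st.1 st.2) (found, gacc)).2 j)) := by
  intro G
  induction G with
  | nil =>
    intro s ℓ found S gacc h0s hsl hsn hG hgacc hWF hcov hacc2 hacc
    have hL : 0 < k.length := List.length_pos_iff.mpr hk
    refine ⟨S, ?_, hWF, ?_, ?_⟩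
    · intro fA hfA
      simp only [List.foldl_nil]
      obtain ⟨sN, rfl⟩ : ∃ sN : Nat, s = (sN : Int) := ⟨s.toNat, (Int.toNat_of_nonneg h0s).symm⟩
      rw [Int.toNat_natCast] at hfA
      exact aScan_drain cq k e hk fA sN found S (by exact_mod_cast hsn) hfA (by
        intro jN hj hocc
        have hjL : jN + k.length ≤ cq.length := by
          have h4 := hocc.length_le; rw [List.length_drop] at h4; omega
        have hWS : Within S (jN : Int) := by
          by_contra hns
          rcases (hcov (jN : Int) (by exact_mod_cast hj) (by push_cast; omega)).mp hns with ⟨p, hp, _⟩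
          cases hp
        rw [overlap_any_iff S _ _ hWF (by push_cast; omega)]
        exact ⟨(jN : Int), le_refl _, by push_cast; omega, hWS⟩)
    · simp only [List.foldl_nil]
      exact GapsOK_mono_hi 0 ℓ _ gacc (GapsOK_le ℓ _ [] hG) hgacc
    · intro j h1 h2
      simp only [List.foldl_nil]
      by_cases hjs : j < s
      · exact hacc j h1 hjs
      · constructor
        · intro hns
          exfalso
          rcases (hcov j (by omega) h2).mp hns with ⟨p, hp, _⟩
          cases hp
        · intro hg
          exact absurd (hacc2 j hg) hjs
  | cons g rest ih =>
    intro s ℓ found S gacc h0s hsl hsn hG hgacc hWF hcov hacc2 hacc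
    obtain ⟨hlg, hgg, hrest⟩ := hG
    have hb1 : g.2 + 1 ≤ (cq.length : Int) + 1 := GapsOK_le _ _ _ hrest
    have h0g1 : 0 ≤ g.1 := le_trans h0s (le_trans hsl hlg)
    have hWrest_lb : ∀ j, Within rest j → g.2 + 1 ≤ j :=
      fun j h => (Within_bounds _ _ _ _ hrest h).1
    have hcovb : g.2 = (cq.length : Int) ∨ Within S g.2 := by
      rcases eq_or_lt_of_le (show g.2 ≤ (cq.length : Int) by omega) with he | hlt
      · exact Or.inl he
      · right
        have hnG : ¬ Within (g :: rest) g.2 := by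
          rintro ⟨p, hp, hp1, hp2⟩
          rcases List.mem_cons.mp hp with rfl | hp
          · omega
          · have := hWrest_lb g.2 ⟨p, hp, hp1, hp2⟩; omega
        by_contra hns
        exact hnG ((hcov g.2 (by omega) hlt).mp hns)
    have hwin := window cq k e hk (cq.length + 1) g.1 g.2 found S gacc h0g1 hgg (by omega)
      (by omega) hWF
      (fun j h1 h2 => (hcov j (by omega) (by omega)).mpr ⟨g, List.mem_cons_self .., h1, h2⟩)
      hcovb
    obtain ⟨found', pieces, S', hEq, hOKp, hWF', hchar1, hchar2, hlink⟩ := hwin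
    have hWpieces : ∀ j, Within pieces j → g.1 ≤ j ∧ j + 1 < g.2 + 1 :=
      fun j h => Within_bounds _ _ _ _ hOKp h
    have hfold : (g :: rest).foldl (fun st g => bGap cq k e (cq.length + 1) g.1 g.2 st.1 st.2) (found, gacc)
        = rest.foldl (fun st g => bGap cq k e (cq.length + 1) g.1 g.2 st.1 st.2) (found', gacc ++ pieces) := by
      rw [List.foldl_cons, hEq]
    have hih := ih g.2 (g.2 + 1) found' S' (gacc ++ pieces) (by omega) (by omega) (by omega)
      hrest
      (GapsOK_append 0 ℓ (g.2 + 1) gacc pieces hgacc (GapsOK_weaken g.1 ℓ (g.2 + 1) pieces hlg hOKp))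
      hWF'
      (by
        intro j h1 h2
        by_cases hje : g.2 < j
        · rw [hchar2 j (by omega)]
          rw [hcov j (by omega) h2]
          constructor
          · rintro ⟨p, hp, hp1, hp2⟩
            rcases List.mem_cons.mp hp with rfl | hp
            · exact absurd hp2 (by omega)
            · exact ⟨p, hp, hp1, hp2⟩
          · rintro ⟨p, hp, hp1, hp2⟩
            exact ⟨p, List.mem_cons_of_mem _ hp, hp1, hp2⟩
        · have hje' : j = g.2 := by omega
          subst hje'
          have hWS' : Within S' g.2 := by
            rw [hchar2 g.2 (by omega)]
            rcases hcovb with he | hw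
            · exact absurd he (by omega)
            · exact hw
          constructor
          · intro hns; exact absurd hWS' hns
          · intro hw; exact absurd (hWrest_lb g.2 hw) (by omega)
      )
      (by
        intro j hw
        rcases (Within_append gacc pieces j).mp hw with h | h
        · have := hacc2 j h; omega
        · have := hWpieces j h; omega)
      (by
        intro j h1 h2
        rw [Within_append]
        by_cases hjs : j < s
        · rw [hchar2 j (by omega)]
          rw [hacc j h1 hjs]
          constructor
          · exact Or.inl
          · rintro (h | h)
            · exact h
            · exact absurd (hWpieces j h).1 (by omega)
        · by_cases hjg : j < g.1
          · have hWS : Within S j := by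
              by_contra hns
              rcases (hcov j (by omega) (by omega)).mp hns with ⟨p, hp, hp1, hp2⟩
              rcases List.mem_cons.mp hp with rfl | hp
              · omega
              · have := hWrest_lb j ⟨p, hp, hp1, hp2⟩; omega
            rw [hchar2 j (by omega)]
            constructor
            · intro hns; exact absurd hWS hns
            · rintro (h | h)
              · exact absurd (hacc2 j h) hjs
              · exact absurd (hWpieces j h).1 (by omega)
          · rw [hchar1 j (by omega) h2]
            constructor
            · exact Or.inr
            · rintro (h | h)
              · exact absurd (hacc2 j h) (by omega)
              · exact h
      )
    obtain ⟨S'', hlink2, hWF2, hOK2, hcharF⟩ := hih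
    refine ⟨S'', ?_, hWF2, by rw [hfold]; exact hOK2, by rw [hfold]; exact hcharF⟩
    intro fA hfA
    rw [hfold]
    obtain ⟨sN, rfl⟩ : ∃ sN : Nat, s = (sN : Int) := ⟨s.toNat, (Int.toNat_of_nonneg h0s).symm⟩
    rw [Int.toNat_natCast] at hfA
    obtain ⟨g1N, hg1N⟩ : ∃ g1N : Nat, g.1 = (g1N : Int) := ⟨g.1.toNat, (Int.toNat_of_nonneg h0g1).symm⟩
    have hskip : aScan cq k e fA ((sN : Nat) : Int) found S = aScan cq k e fA ((g1N : Nat) : Int) found S := by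
      apply aScan_skip cq k e hk fA sN g1N found S (by omega) (by omega) hfA
      intro p h1 h2 hocc
      have hL : 0 < k.length := List.length_pos_iff.mpr hk
      have hjL : p + k.length ≤ cq.length := by
        have h4 := hocc.length_le; rw [List.length_drop] at h4; omega
      have hWS : Within S (p : Int) := by
        by_contra hns
        rcases (hcov (p : Int) (by exact_mod_cast h1) (by push_cast; omega)).mp hns with ⟨q, hq, hq1, hq2⟩
        rcases List.mem_cons.mp hq with rfl | hq
        · omega
        · have := hWrest_lb (p : Int) ⟨q, hq, hq1, hq2⟩; omega
      rw [overlap_any_iff S _ _ hWF (by push_cast; omega)]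
      exact ⟨(p : Int), le_refl _, by push_cast; omega, hWS⟩
    calc aScan cq k e fA ((sN : Nat) : Int) found S
        = aScan cq k e fA ((g1N : Nat) : Int) found S := hskip
      _ = aScan cq k e fA g.2 found' S' := by
            rw [← hg1N]
            exact hlink fA (by rw [hg1N, Int.toNat_natCast]; omega)
      _ = ((rest.foldl (fun st g => bGap cq k e (cq.length + 1) g.1 g.2 st.1 st.2) (found', gacc ++ pieces)).1, S'') := by
            exact hlink2 fA (by omega)

-- ===== all keys =====

theorem allKeys (cq : List Char) (ent : String → String × String) :
    ∀ (ks : List String) (found : List (String × String)) (S gaps : List (Int × Int)),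
      (∀ kk ∈ ks, kk.toList ≠ []) →
      (∀ se ∈ S, se.1 < se.2) →
      GapsOK 0 ((cq.length : Int) + 1) gaps →
      (∀ j : Int, 0 ≤ j → j < (cq.length : Int) → (¬ Within S j ↔ Within gaps j)) →
      (ks.foldl (fun st kk => aScan cq kk.toList (ent kk) (cq.length + 1) 0 st.1 st.2) (found, S)).1
      = (ks.foldl (fun st kk => st.2.foldl
            (fun st2 g => bGap cq kk.toList (ent kk) (cq.length + 1) g.1 g.2 st2.1 st2.2)
            (st.1, ([] : List (Int × Int)))) (found, gaps)).1 := by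
  intro ks
  induction ks with
  | nil => intro found S gaps _ _ _ _; rfl
  | cons kk ks ihk =>
    intro found S gaps hne hWF hOK hchar
    have hk : kk.toList ≠ [] := hne kk (List.mem_cons_self ..)
    obtain ⟨S', hlink, hWF', hOK', hchar'⟩ := perKey cq kk.toList (ent kk) hk gaps 0 0 found S []
      (le_refl 0) (le_refl 0) (by positivity) hOK (le_refl 0) hWF
      (fun j h1 h2 => hchar j h1 h2)
      (fun j hw => by rcases hw with ⟨p, hp, _⟩; cases hp)
      (fun j h1 h2 => absurd h2 (by omega))
    have hstep := hlink (cq.length + 1) (by omega)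
    simp only [List.foldl_cons]
    rw [hstep]
    exact ihk _ S' _ (fun x hx => hne x (List.mem_cons_of_mem _ hx)) hWF' hOK' hchar'

theorem mem_keys_ofList {κ ν : Type} [BEq κ] [LawfulBEq κ] (l : List (κ × ν)) (k : κ) :
    k ∈ (PySem.Dict.ofList l).keys ↔ k ∈ l.map Prod.fst := by
  show k ∈ (l.foldl (fun d p => d.insert p.1 p.2) PySem.Dict.empty).keys ↔ _
  rw [show (fun (d : PySem.Dict κ ν) (p : κ × ν) => d.insert p.1 p.2)
      = (fun d p => d.insert (Prod.fst p) ((fun (_ : PySem.Dict κ ν) (x : κ × ν) => x.2) d p)) from rfl]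
  rw [PySem.Dict.keys_foldl_insert_key]
  simp [PySem.Set.mem_update, PySem.Dict.keys_empty]

-- ===== VERDICT (by name: the statement is the Claim_ definition above) =====
set_option maxHeartbeats 1000000 in
theorem extract_surfaces_spec : Claim_equal_extract_surfaces := by
  intro surface2cui text _ hpre
  unfold Spec_extract_surfaces
  simp only [extract_surfaces, extract_surfaces_alt, tok_lc]
  congr 1
  apply allKeys
  · intro s hs
    rw [PySem.List.mem_sorted] at hs
    rw [mem_keys_ofList] at hs
    obtain ⟨p, hp, rfl⟩ := List.mem_map.mp hs
    simp only [ne_eq, String.toList_eq_nil_iff]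
    exact hpre p hp
  · intro se h; cases h
  · exact ⟨le_refl 0, by positivity, by simp [GapsOK]⟩
  · intro j h1 h2
    constructor
    · intro _; exact ⟨(0, _), List.mem_singleton.mpr rfl, h1, h2⟩
    · intro _ h; rcases h with ⟨p, hp, _⟩; cases hp
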